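-- pv_equiv track=rewrite | github.com/don-v/Math_Programming | FunctionsNGraphs/Ch7/Section7_9/Ch3/x03_06_rc_zeros.py | get_possible_zeros
-- ===== SOURCE A (Python) =====
-- from itertools import product
--
-- def get_abs_value(x):
--     if x >= 0:
--         return x
--     else:
--         return -x
--
-- def get_factors(x):
--     """returns factors of x"""
--     facts = list()
--     for i in range(1,x+1):
--         if x % i == 0:
--             facts.append(i)
--     return facts
--
-- def get_possible_zeros(a_n,a_0):
--     possible_c = get_factors(get_abs_value(a_0))
--     possible_d_pos = get_factors(a_n)
--     possible_d = list(map(lambda j: j*-1, possible_d_pos)) + possible_d_pos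
--     positive_possibles = product(possible_c,possible_d)
--     possible_zeros = list()
--     for c,d in positive_possibles:
--         possible_zeros.append(f'{c}/{d}')
--     return possible_zeros
-- ===== SOURCE B (Python) =====
-- def get_possible_zeros(a_n, a_0):
--     def factors(x):
--         # divisors of x (ascending) via trial division up to isqrt(x); [] if x <= 0
--         r = 0
--         while (r + 1) * (r + 1) <= x:
--             r += 1
--         small = [i for i in range(1, r + 1) if x % i == 0]
--         large = [x // i for i in range(r, 0, -1) if x % i == 0 and i * i != x]
--         return small + large
--     cs = factors(a_0 if a_0 >= 0 else -a_0)
--     ds = factors(a_n)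
--     signed = [-d for d in ds] + ds
--     return [f'{c}/{d}' for c in cs for d in signed]
-- ===== Notes on version B (the rewrite author's own statement) =====
-- stated objective: faster
-- what changed: B finds the factor lists by trial division only up to the integer square root (collecting each divisor i and its cofactor x//i) instead of testing every integer from 1 to x, then emits the same c/d strings by a comprehension.
import Mathlib
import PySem

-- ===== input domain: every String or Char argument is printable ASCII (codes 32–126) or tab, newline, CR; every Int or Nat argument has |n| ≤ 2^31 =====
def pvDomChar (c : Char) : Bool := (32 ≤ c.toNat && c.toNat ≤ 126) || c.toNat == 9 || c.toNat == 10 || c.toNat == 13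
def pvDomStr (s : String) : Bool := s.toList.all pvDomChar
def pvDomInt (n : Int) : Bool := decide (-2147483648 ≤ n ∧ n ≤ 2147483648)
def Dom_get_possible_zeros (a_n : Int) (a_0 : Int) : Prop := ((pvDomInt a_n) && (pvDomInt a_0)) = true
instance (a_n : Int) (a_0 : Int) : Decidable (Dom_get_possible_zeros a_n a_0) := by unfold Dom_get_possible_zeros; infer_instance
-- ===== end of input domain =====

-- B replaces A's 1..x divisor scan by trial division up to the integer square root (asymptotically fewer iterations).

-- ===== PORT A =====
def pvGetAbsValue (x : Int) : Int := if x ≥ 0 then x else -x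

def pvGetFactors (x : Int) : List Int :=
  (PySem.List.pyRange 1 (x + 1) 1).foldl
    (fun facts i => if PySem.Int.mod x i == 0 then facts ++ [i] else facts) []

def get_possible_zeros (a_n : Int) (a_0 : Int) : List String :=
  let possible_c := pvGetFactors (pvGetAbsValue a_0)
  let possible_d_pos := pvGetFactors a_n
  let possible_d := possible_d_pos.map (fun j => j * (-1)) ++ possible_d_pos
  let positive_possibles := possible_c.flatMap (fun c => possible_d.map (fun d => (c, d)))
  positive_possibles.foldl
    (fun acc cd => acc ++ [PySem.Int.toStr cd.1 ++ "/" ++ PySem.Int.toStr cd.2]) []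

-- ===== PORT B =====
-- the 'while (r+1)*(r+1) <= x: r += 1' loop; fuel only makes it total (never exhausted when fuel ≥ (x-r).toNat)
def pvIsqrtLoop (x : Int) : Nat → Int → Int
  | 0, r => r
  | fuel + 1, r => if (r + 1) * (r + 1) ≤ x then pvIsqrtLoop x fuel (r + 1) else r

def pvFactorsB (x : Int) : List Int :=
  let r := pvIsqrtLoop x (x.toNat + 1) 0
  let small := (PySem.List.pyRange 1 (r + 1) 1).filter (fun i => PySem.Int.mod x i == 0)
  let large := ((PySem.List.pyRange r 0 (-1)).filter
      (fun i => PySem.Int.mod x i == 0 && i * i != x)).map (fun i => PySem.Int.floordiv x i)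
  small ++ large

def get_possible_zeros_alt (a_n : Int) (a_0 : Int) : List String :=
  let cs := pvFactorsB (if a_0 ≥ 0 then a_0 else -a_0)
  let ds := pvFactorsB a_n
  let signed := ds.map (fun d => -d) ++ ds
  cs.flatMap (fun c => signed.map (fun d => PySem.Int.toStr c ++ "/" ++ PySem.Int.toStr d))

-- ===== PRECONDITION & SPEC =====
def Spec_get_possible_zeros (a_n : Int) (a_0 : Int) (out : List String) : Prop := out = get_possible_zeros_alt a_n a_0
instance (a_n : Int) (a_0 : Int) (out : List String) : Decidable (Spec_get_possible_zeros a_n a_0 out) := by unfold Spec_get_possible_zeros; infer_instance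

-- ===== CLAIM (what is proved, stated in full; the proofs are below) =====
def Claim_equal_get_possible_zeros : Prop := ∀ (a_n : Int) (a_0 : Int), Dom_get_possible_zeros a_n a_0 → Spec_get_possible_zeros a_n a_0 (get_possible_zeros a_n a_0)

-- ===== LEMMAS AND PROOFS =====

theorem pvIsqrtLoop_spec (x : Int) (fuel : Nat) :
    ∀ r : Int, 0 ≤ r → r * r ≤ x → (x - r).toNat ≤ fuel →
      0 ≤ pvIsqrtLoop x fuel r ∧ pvIsqrtLoop x fuel r * pvIsqrtLoop x fuel r ≤ x ∧
        x < (pvIsqrtLoop x fuel r + 1) * (pvIsqrtLoop x fuel r + 1) := by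
  induction fuel with
  | zero =>
    intro r hr hrx hf
    have hxr : x ≤ r := by omega
    simp only [pvIsqrtLoop]
    exact ⟨hr, hrx, by nlinarith⟩
  | succ n ih =>
    intro r hr hrx hf
    by_cases h : (r + 1) * (r + 1) ≤ x
    · simpa [pvIsqrtLoop, h] using ih (r + 1) (by omega) h (by omega)
    · simp only [pvIsqrtLoop, if_neg h]
      exact ⟨hr, hrx, not_le.mp h⟩

-- the bijection d ↦ x/d between divisors above and below the integer square root
theorem large_eq (x r : Int) (hx : 1 ≤ x) (hr0 : 0 ≤ r) (hr1 : r * r ≤ x)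
    (hr2 : x < (r + 1) * (r + 1)) :
    (PySem.List.pyRange (r + 1) (x + 1) 1).filter (fun i => PySem.Int.mod x i == 0)
      = (((PySem.List.pyRange 1 (r + 1) 1).filter
            (fun i => PySem.Int.mod x i == 0 && i * i != x)).map
          (fun i => PySem.Int.floordiv x i)).reverse := by
  have hrpos : 1 ≤ r := by nlinarith
  have key : ∀ i : Int, 1 ≤ i → i ∣ x →
      PySem.Int.floordiv x i * i = x ∧ 1 ≤ PySem.Int.floordiv x i := by
    intro i hi hd
    rw [PySem.Int.floordiv_eq_ediv_of_pos (by omega)]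
    have h1 : x / i * i = x := Int.ediv_mul_cancel hd
    refine ⟨h1, ?_⟩
    by_contra hle
    push_neg at hle
    nlinarith
  have sortedL : ((PySem.List.pyRange (r + 1) (x + 1) 1).filter
      (fun i => PySem.Int.mod x i == 0)).Pairwise (· < ·) :=
    List.Pairwise.sublist List.filter_sublist (PySem.List.pairwise_lt_pyRange_one _ _)
  have sortedF : ((PySem.List.pyRange 1 (r + 1) 1).filter
      (fun i => PySem.Int.mod x i == 0 && i * i != x)).Pairwise (· < ·) :=
    List.Pairwise.sublist List.filter_sublist (PySem.List.pairwise_lt_pyRange_one _ _)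
  have memF : ∀ i : Int, i ∈ (PySem.List.pyRange 1 (r + 1) 1).filter
      (fun i => PySem.Int.mod x i == 0 && i * i != x) →
      1 ≤ i ∧ i ≤ r ∧ i ∣ x ∧ i * i ≠ x := by
    intro i hi
    rcases List.mem_filter.mp hi with ⟨hm, hb⟩
    rcases PySem.List.mem_pyRange_one.mp hm with ⟨h1, h2⟩
    simp only [Bool.and_eq_true, beq_iff_eq, bne_iff_ne, ne_eq] at hb
    exact ⟨h1, by omega, (PySem.Int.mod_eq_zero_iff_dvd x i).mp hb.1, hb.2⟩
  have sortedR : ((((PySem.List.pyRange 1 (r + 1) 1).filter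
      (fun i => PySem.Int.mod x i == 0 && i * i != x)).map
        (fun i => PySem.Int.floordiv x i)).reverse).Pairwise (· < ·) := by
    rw [List.pairwise_reverse, List.pairwise_map]
    refine sortedF.imp_of_mem ?_
    intro a b ha hb hab
    obtain ⟨ha1, _, had, _⟩ := memF a ha
    obtain ⟨hb1, _, hbd, _⟩ := memF b hb
    obtain ⟨hfa, hfa1⟩ := key a ha1 had
    obtain ⟨hfb, hfb1⟩ := key b hb1 hbd
    nlinarith
  have hmem : ∀ d : Int,
      (d ∈ (PySem.List.pyRange (r + 1) (x + 1) 1).filter (fun i => PySem.Int.mod x i == 0)) ↔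
      (d ∈ (((PySem.List.pyRange 1 (r + 1) 1).filter
          (fun i => PySem.Int.mod x i == 0 && i * i != x)).map
            (fun i => PySem.Int.floordiv x i)).reverse) := by
    intro d
    rw [List.mem_reverse, List.mem_map]
    constructor
    · intro hd
      rcases List.mem_filter.mp hd with ⟨hm, hb⟩
      rcases PySem.List.mem_pyRange_one.mp hm with ⟨hd1, hd2⟩
      have hdd : d ∣ x := (PySem.Int.mod_eq_zero_iff_dvd x d).mp (by simpa using hb)
      obtain ⟨c, hc⟩ := hdd
      have hd1' : 1 ≤ d := by omega
      have hc1 : 1 ≤ c := by nlinarith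
      have hcr : c ≤ r := by
        by_contra hcr
        push_neg at hcr
        nlinarith
      refine ⟨c, List.mem_filter.mpr ⟨PySem.List.mem_pyRange_one.mpr ⟨hc1, by omega⟩, ?_⟩, ?_⟩
      · simp only [Bool.and_eq_true, beq_iff_eq, bne_iff_ne, ne_eq]
        refine ⟨(PySem.Int.mod_eq_zero_iff_dvd x c).mpr ⟨d, by rw [hc]; ring⟩, ?_⟩
        intro hcc
        have : d = c := by
          have := hc
          nlinarith
        omega
      · rw [PySem.Int.floordiv_eq_ediv_of_pos (by omega)]
        exact Int.ediv_eq_of_eq_mul_left (by omega) hc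
    · rintro ⟨i, hi, rfl⟩
      obtain ⟨hi1, hir, hid, hine⟩ := memF i hi
      obtain ⟨hfi, hfi1⟩ := key i hi1 hid
      have hdvd : PySem.Int.floordiv x i ∣ x := ⟨i, hfi.symm⟩
      have hle : PySem.Int.floordiv x i ≤ x := by nlinarith
      have hgt : r + 1 ≤ PySem.Int.floordiv x i := by
        by_contra hdr
        push_neg at hdr
        have hdr' : PySem.Int.floordiv x i ≤ r := by omega
        have h1 : r ≤ PySem.Int.floordiv x i := by nlinarith
        have hdi : PySem.Int.floordiv x i = r := le_antisymm hdr' h1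
        have hirr : i = r := by nlinarith
        exact hine (by rw [hirr]; nlinarith)
      exact List.mem_filter.mpr ⟨PySem.List.mem_pyRange_one.mpr ⟨hgt, by omega⟩,
        by simpa using (PySem.Int.mod_eq_zero_iff_dvd x _).mpr hdvd⟩
  have hperm := (List.perm_ext_iff_of_nodup
      (sortedL.imp (fun h => ne_of_lt h)) (sortedR.imp (fun h => ne_of_lt h))).mpr hmem
  exact List.eq_of_perm_of_sorted (fun a b _ _ h h' => absurd h' (lt_asymm h))
    sortedL sortedR hperm

theorem factors_eq (x : Int) : pvGetFactors x = pvFactorsB x := by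
  by_cases hx : x ≤ 0
  · have hfa : pvGetFactors x = [] := by
      simp [pvGetFactors, PySem.List.pyRange_one_eq_nil (by omega : x + 1 ≤ 1)]
    have hnat : x.toNat = 0 := Int.toNat_of_nonpos hx
    have hloop : pvIsqrtLoop x (x.toNat + 1) 0 = 0 := by
      rw [hnat]
      have hg : ¬(((0:Int) + 1) * (0 + 1) ≤ x) := by
        intro h
        norm_num at h
        omega
      simp only [pvIsqrtLoop, if_neg hg]
    simp [pvFactorsB, hfa, hloop, PySem.List.pyRange_one_eq_nil (by omega : (1:Int) ≤ 1),
      PySem.List.pyRange_neg_one_eq_nil (le_refl (0:Int))]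
  · push_neg at hx
    have hx1 : 1 ≤ x := hx
    obtain ⟨hr0, hr1, hr2⟩ := pvIsqrtLoop_spec x (x.toNat + 1) 0 le_rfl (by omega) (by omega)
    set r := pvIsqrtLoop x (x.toNat + 1) 0 with hrdef
    have hrx : r ≤ x := by nlinarith
    rw [pvGetFactors, pvFactorsB, PySem.List.foldl_append_if_eq_filter, List.nil_append,
      PySem.List.pyRange_one_append 1 (r + 1) (x + 1) (by omega) (by omega),
      List.filter_append, PySem.List.pyRange_neg_one_eq_reverse, List.filter_reverse,
      List.map_reverse]
    show _ ++ _ = _ ++ _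
    rw [show ((0:Int) + 1) = 1 by ring, large_eq x r hx1 hr0 hr1 hr2]

-- ===== VERDICT (by name: the statement is the Claim_ definition above) =====
theorem get_possible_zeros_spec : Claim_equal_get_possible_zeros := by
  intro a_n a_0 _
  unfold Spec_get_possible_zeros get_possible_zeros get_possible_zeros_alt pvGetAbsValue
  simp only [factors_eq, PySem.List.foldl_append_singleton_eq_map, List.nil_append,
    List.map_flatMap, List.map_map, List.map_append]
  simp [Function.comp_def]
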